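-- pv_equiv track=rewrite | github.com/tak2004/xil | formatter/formatter.py | type_statement
-- ===== SOURCE A (Python) =====
-- def type_statement(children):
--     """bytes|align = SIGNED_NUMBER"""
--     # children: [TYPE_KEY_result, "=", SIGNED_NUMBER] oder [TYPE_KEY_result, SIGNED_NUMBER]
--     # TYPE_KEY_result ist bereits ein String ("bytes" oder "align")
--     # "=" könnte fehlen, wenn es als Literal behandelt wird
--
--     if len(children) < 2:
--         return [""]
--
--     # Nimm das erste Element als key (bereits transformiert von TYPE_KEY)
--     key = str(children[0])
--
--     # Prüfe ob key "bytes" oder "align" ist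
--     if key not in ("bytes", "align"):
--         return [""]
--
--     # Finde den value (SIGNED_NUMBER), überspringe "=" falls vorhanden
--     value = None
--     for i in range(1, len(children)):
--         val_str = str(children[i])
--         if val_str != "=":
--             # Prüfe ob es eine Zahl ist
--             try:
--                 int(val_str)  # Test ob es eine Zahl ist (positiv oder negativ)
--                 value = val_str
--                 break
--             except ValueError:
--                 pass
--
--     if value is None:
--         # Fallback: nimm das letzte Element, das nicht "=" ist
--         for i in range(len(children) - 1, 0, -1):
--             val_str = str(children[i])
--             if val_str != "=":
--                 value = val_str
--                 break
--
--     if value is None: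
--         return [""]
--
--     # type_statement hat keine Leerzeichen um das Gleichheitszeichen
--     result = f"{key}={value}"
--     return [result]
-- ===== SOURCE B (Python) =====
-- def type_statement(children):
--     """bytes|align = SIGNED_NUMBER"""
--     if len(children) < 2:
--         return [""]
--     key = str(children[0])
--     if key not in ("bytes", "align"):
--         return [""]
--     first_int = None
--     last_nonequal = None
--     for c in children[1:]:
--         s = str(c)
--         if s != "=":
--             if first_int is None:
--                 try:
--                     int(s)
--                     first_int = s
--                 except ValueError:
--                     pass
--             last_nonequal = s
--     value = first_int if first_int is not None else last_nonequal
--     if value is None: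
--         return [""]
--     return [f"{key}={value}"]
-- ===== Notes on version B (the rewrite author's own statement) =====
-- stated objective: alternative
-- what changed: Replaces A's two sequential scans (forward break-on-first-int, then a backward fallback over the reversed range) by a single forward pass over children[1:] that maintains both the first int-parsable string and the last non-'=' string at once.
import Mathlib
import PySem

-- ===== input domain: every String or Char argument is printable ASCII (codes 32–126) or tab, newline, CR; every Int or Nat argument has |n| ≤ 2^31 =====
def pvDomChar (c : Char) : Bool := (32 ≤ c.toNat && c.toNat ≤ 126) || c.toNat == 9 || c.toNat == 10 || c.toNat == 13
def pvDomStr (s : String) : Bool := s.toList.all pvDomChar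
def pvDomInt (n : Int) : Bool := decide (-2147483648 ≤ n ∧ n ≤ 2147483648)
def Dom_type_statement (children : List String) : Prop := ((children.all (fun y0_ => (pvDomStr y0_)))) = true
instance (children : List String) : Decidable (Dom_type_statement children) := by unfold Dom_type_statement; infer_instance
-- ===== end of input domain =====

-- B replaces A's two sequential scans by one forward pass tracking the first int-parsable
-- string and the last non-"=" string at once (alternative decomposition, same cost).

-- ===== PORT A =====
-- first loop of A: scan for the first non-"=" element that int() accepts, break on success
def pvFindFirstInt : List String → Option String
  | [] => none
  | s :: rest =>
    if s ≠ "=" then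
      match PySem.Int.ofStr? s with
      | some _ => some s
      | none => pvFindFirstInt rest
    else pvFindFirstInt rest

-- second loop of A: from index len-1 down to 1, take the first non-"=" element;
-- ported as the first non-"=" element of the reversed tail (the same iteration order)
def pvFindLastNonEq : List String → Option String
  | [] => none
  | s :: rest => if s ≠ "=" then some s else pvFindLastNonEq rest

def type_statement (children : List String) : List String :=
  if children.length < 2 then [""]
  else
    let key := children.getD 0 ""
    if key ≠ "bytes" ∧ key ≠ "align" then [""]
    else
      let value :=
        match pvFindFirstInt (children.drop 1) with
        | some v => some v
        | none => pvFindLastNonEq ((children.drop 1).reverse)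
      match value with
      | none => [""]
      | some v => [key ++ "=" ++ v]

-- ===== PORT B =====
-- one step of B's single loop: update (first_int, last_nonequal) with the next element
def pvStep (st : Option String × Option String) (s : String) : Option String × Option String :=
  if s ≠ "=" then
    (match st.1 with
     | some v => some v
     | none =>
       match PySem.Int.ofStr? s with
       | some _ => some s
       | none => none,
     some s)
  else st

def type_statement_alt (children : List String) : List String :=
  if children.length < 2 then [""]
  else
    let key := children.getD 0 ""
    if key ≠ "bytes" ∧ key ≠ "align" then [""]
    else
      let st := (children.drop 1).foldl pvStep (none, none)
      let value := match st.1 with | some v => some v | none => st.2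
      match value with
      | none => [""]
      | some v => [key ++ "=" ++ v]

-- ===== PRECONDITION & SPEC =====
def Spec_type_statement (children : List String) (out : List String) : Prop := out = type_statement_alt children
instance (children : List String) (out : List String) : Decidable (Spec_type_statement children out) := by unfold Spec_type_statement; infer_instance

-- ===== CLAIM (what is proved, stated in full; the proofs are below) =====
def Claim_equal_type_statement : Prop := ∀ (children : List String), Dom_type_statement children → Spec_type_statement children (type_statement children)

-- ===== LEMMAS AND PROOFS =====
theorem pvFindLastNonEq_append (xs ys : List String) :
    pvFindLastNonEq (xs ++ ys) =
      (match pvFindLastNonEq xs with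
       | some v => some v
       | none => pvFindLastNonEq ys) := by
  induction xs with
  | nil => simp [pvFindLastNonEq]
  | cons s rest ih =>
    by_cases h : s = "=" <;> simp [pvFindLastNonEq, h, ih]

theorem pvFold_inv (l : List String) (f0 l0 : Option String) :
    l.foldl pvStep (f0, l0) =
      ((match f0 with
        | some v => some v
        | none => pvFindFirstInt l),
       (match pvFindLastNonEq l.reverse with
        | some v => some v
        | none => l0)) := by
  induction l generalizing f0 l0 with
  | nil => cases f0 <;> simp [pvFindFirstInt, pvFindLastNonEq]
  | cons s rest ih =>
    simp only [List.foldl_cons, List.reverse_cons, pvFindLastNonEq_append]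
    rw [ih]
    by_cases h : s = "=" <;>
      cases f0 <;>
      simp [pvStep, pvFindFirstInt, pvFindLastNonEq, h] <;>
      rcases hc : PySem.Int.ofStr? s with _ | n <;>
      cases hl : pvFindLastNonEq rest.reverse <;>
      simp

-- ===== VERDICT (by name: the statement is the Claim_ definition above) =====
theorem type_statement_spec : Claim_equal_type_statement := by
  intro children _
  unfold Spec_type_statement type_statement type_statement_alt
  rw [pvFold_inv]
  rcases hf : pvFindFirstInt (children.drop 1) <;>
    rcases hl : pvFindLastNonEq (children.drop 1).reverse <;>
    simp
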